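-- pv_equiv track=rewrite | github.com/Freakwill/Thomas | mystat.py | joint
-- ===== SOURCE A (Python) =====
-- def joint(x, y):
--     c0 = []
--     c1 = []
--     cs = []
--     for xi, yi in zip(x, y):
--         if yi == 0:
--             if xi in cs:
--                 k = cs.index(xi)
--                 c0[k] += 1
--             else:
--                 c0.append(1)
--                 c1.append(0)
--                 cs.append(xi)
--         else:
--             if xi in cs:
--                 k = cs.index(xi)
--                 c1[k] += 1
--             else:
--                 c1.append(1)
--                 c0.append(0)
--                 cs.append(xi)
--     return c0, c1
-- ===== SOURCE B (Python) =====
-- def joint(x, y):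
--     # Staged declarative passes, no incremental counter state: truncate x to
--     # the zipped length, dedup keys with dict.fromkeys, keep the x values where
--     # y == 0, then per key c0 = count among zeros and c1 = total count - c0.
--     xs = [xi for xi, _ in zip(x, y)]
--     keys = list(dict.fromkeys(xs))
--     zeros = [xi for xi, yi in zip(x, y) if yi == 0]
--     c0 = [zeros.count(k) for k in keys]
--     c1 = [xs.count(k) - z for k, z in zip(keys, c0)]
--     return c0, c1
-- ===== Notes on version B (the rewrite author's own statement) =====
-- stated objective: simpler
-- what changed: Replaces A's single stateful loop over three growing parallel lists (membership test + cs.index scan + in-place increment per element) by staged declarative passes: dedup keys with dict.fromkeys, keep the x values where y==0, then per key c0 = zeros.count(k) and c1 = total count minus c0.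
import Mathlib
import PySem

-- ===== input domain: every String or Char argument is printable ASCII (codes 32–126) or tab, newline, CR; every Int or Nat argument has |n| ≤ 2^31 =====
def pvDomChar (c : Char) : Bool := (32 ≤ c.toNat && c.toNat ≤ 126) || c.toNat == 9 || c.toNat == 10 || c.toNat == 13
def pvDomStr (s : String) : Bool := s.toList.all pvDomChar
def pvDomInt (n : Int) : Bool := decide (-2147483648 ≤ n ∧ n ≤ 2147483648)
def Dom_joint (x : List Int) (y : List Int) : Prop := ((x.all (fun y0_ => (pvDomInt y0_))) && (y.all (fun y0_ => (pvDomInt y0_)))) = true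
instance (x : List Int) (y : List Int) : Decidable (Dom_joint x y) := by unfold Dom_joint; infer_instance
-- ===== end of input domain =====

-- B replaces A's stateful loop over three growing parallel lists by staged declarative
-- passes (dedup keys, split by the y==0 test, count each key); return values proved equal.

-- ===== PORT A =====
-- One step of A's loop body: state (c0, c1, cs); `xi in cs` followed by `cs.index(xi)`
-- is ported as one match on PySem.List.index? (some ↔ membership, same first index).
def jointStep (st : List Int × List Int × List Int) (p : Int × Int) :
    List Int × List Int × List Int :=
  let (c0, c1, cs) := st
  if p.2 == 0 then
    match PySem.List.index? cs p.1 with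
    | some k => (c0.modify k (· + 1), c1, cs)
    | none   => (c0 ++ [1], c1 ++ [0], cs ++ [p.1])
  else
    match PySem.List.index? cs p.1 with
    | some k => (c0, c1.modify k (· + 1), cs)
    | none   => (c0 ++ [0], c1 ++ [1], cs ++ [p.1])

def joint (x : List Int) (y : List Int) : List Int × List Int :=
  let st := (x.zip y).foldl jointStep ([], [], [])
  (st.1, st.2.1)

-- ===== PORT B =====
-- xs = x truncated to the zipped length; keys = dict.fromkeys (first-appearance
-- dedup = PySem.Set.ofList); zeros = the filter comprehension; c0 via list.count
-- per key over zeros; c1 = total count per key minus c0.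
def joint_alt (x : List Int) (y : List Int) : List Int × List Int :=
  let xs := (x.zip y).map Prod.fst
  let keys := PySem.Set.ofList xs
  let zeros := ((x.zip y).filter (fun p => p.2 == 0)).map Prod.fst
  let c0 := keys.map (fun k => (PySem.List.count zeros k : Int))
  let c1 := (keys.zip c0).map (fun kz => (PySem.List.count xs kz.1 : Int) - kz.2)
  (c0, c1)

-- ===== PRECONDITION & SPEC =====
def Spec_joint (x : List Int) (y : List Int) (out : List Int × List Int) : Prop := out = joint_alt x y
instance (x : List Int) (y : List Int) (out : List Int × List Int) : Decidable (Spec_joint x y out) := by unfold Spec_joint; infer_instance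

-- ===== CLAIM =====
def Claim_equal_joint : Prop := ∀ (x : List Int) (y : List Int), Dom_joint x y → Spec_joint x y (joint x y)

-- ===== LEMMAS AND PROOFS =====

-- Canonical description of A's loop result: first-appearance keys and the two counts.
def jKeys (ps : List (Int × Int)) : List Int := PySem.Set.ofList (ps.map Prod.fst)

def jC0 (ps : List (Int × Int)) (v : Int) : Int :=
  (ps.countP (fun p => p.1 == v && p.2 == 0) : Int)

def jC1 (ps : List (Int × Int)) (v : Int) : Int :=
  (ps.countP (fun p => p.1 == v && !(p.2 == 0)) : Int)

theorem jC0_append (qs : List (Int × Int)) (p : Int × Int) (v : Int) :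
    jC0 (qs ++ [p]) v = jC0 qs v + (if p.1 = v ∧ p.2 = 0 then 1 else 0) := by
  simp only [jC0, List.countP_append]
  push_cast
  by_cases h1 : p.1 = v <;> by_cases h2 : p.2 = 0 <;> simp [h1, h2]

theorem jC1_append (qs : List (Int × Int)) (p : Int × Int) (v : Int) :
    jC1 (qs ++ [p]) v = jC1 qs v + (if p.1 = v ∧ p.2 ≠ 0 then 1 else 0) := by
  simp only [jC1, List.countP_append]
  push_cast
  by_cases h1 : p.1 = v <;> by_cases h2 : p.2 = 0 <;> simp [h1, h2]

-- Bumping a mapped list at the (unique) index of v is mapping a pointwise-bumped function.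
theorem modify_map_index (K : List Int) (f : Int → Int) (v : Int) (k : Nat)
    (hnd : K.Nodup) (hk : PySem.List.index? K v = some k) :
    (K.map f).modify k (· + 1) = K.map (fun w => if w = v then f w + 1 else f w) := by
  induction K generalizing k with
  | nil => simp [PySem.List.index?] at hk
  | cons a K ih =>
    rcases List.nodup_cons.mp hnd with ⟨hna, hndK⟩
    by_cases hav : a = v
    · subst hav
      rw [PySem.List.index?_cons_self] at hk
      injection hk with hk0
      subst hk0
      have hcongr : ∀ w ∈ K, f w = if w = a then f w + 1 else f w := by
        intro w hw
        have hne : w ≠ a := fun h => hna (h ▸ hw)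
        simp [hne]
      simp [List.map_congr_left hcongr]
    · rw [PySem.List.index?_cons_of_ne _ hav] at hk
      cases hkk : PySem.List.index? K v with
      | none => rw [hkk] at hk; simp at hk
      | some k' =>
        rw [hkk] at hk
        simp only [Option.map_some] at hk
        cases hk
        simp only [List.map_cons, List.modify_succ_cons]
        rw [ih k' hndK hkk]
        simp [hav]

-- A key absent from qs's x-values contributes no counts over qs.
theorem jC0_fresh (qs : List (Int × Int)) (v : Int) (hmem : v ∉ jKeys qs) : jC0 qs v = 0 := by
  simp only [jC0]
  norm_cast
  rw [List.countP_eq_zero]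
  intro a ha
  have hne : a.1 ≠ v := by
    intro h
    exact hmem (by rw [jKeys, PySem.Set.mem_ofList]; exact h ▸ List.mem_map_of_mem ha)
  simp [hne]

theorem jC1_fresh (qs : List (Int × Int)) (v : Int) (hmem : v ∉ jKeys qs) : jC1 qs v = 0 := by
  simp only [jC1]
  norm_cast
  rw [List.countP_eq_zero]
  intro a ha
  have hne : a.1 ≠ v := by
    intro h
    exact hmem (by rw [jKeys, PySem.Set.mem_ofList]; exact h ▸ List.mem_map_of_mem ha)
  simp [hne]

-- A's loop computes the canonical triple.
theorem jointA_loop (ps : List (Int × Int)) :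
    ps.foldl jointStep ([], [], []) =
      ((jKeys ps).map (jC0 ps), (jKeys ps).map (jC1 ps), jKeys ps) := by
  induction ps using List.reverseRecOn with
  | nil => simp [jKeys, PySem.Set.ofList_nil]
  | append_singleton qs p ih =>
    have hnd : (jKeys qs).Nodup := PySem.Set.nodup_ofList _
    have hkeys : jKeys (qs ++ [p]) = PySem.Set.add (jKeys qs) p.1 := by
      simp [jKeys, PySem.Set.ofList_append_singleton]
    rw [List.foldl_append, ih]
    by_cases hmem : p.1 ∈ jKeys qs
    · -- existing key: index? hits, one count is bumped in place, keys unchanged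
      obtain ⟨k, hk⟩ := Option.isSome_iff_exists.mp
        ((PySem.List.index?_isSome_iff (jKeys qs) p.1).mpr hmem)
      have hkeys' : jKeys (qs ++ [p]) = jKeys qs := by
        rw [hkeys, PySem.Set.add_of_mem hmem]
      by_cases hy : p.2 = 0
      · simp only [List.foldl_cons, List.foldl_nil, jointStep, hy, beq_self_eq_true, if_true, hk]
        rw [hkeys']
        refine Prod.ext ?_ (Prod.ext ?_ rfl)
        · rw [modify_map_index _ _ _ _ hnd hk]
          apply List.map_congr_left
          intro w hw
          rw [jC0_append]
          by_cases hwv : w = p.1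
          · simp [hwv, hy]
          · simp [hwv, Ne.symm hwv, hy]
        · apply List.map_congr_left
          intro w hw
          rw [jC1_append]
          simp [hy]
      · simp only [List.foldl_cons, List.foldl_nil, jointStep, if_neg (by simp [hy] : ¬ (p.2 == 0) = true), hk]
        rw [hkeys']
        refine Prod.ext ?_ (Prod.ext ?_ rfl)
        · apply List.map_congr_left
          intro w hw
          rw [jC0_append]
          simp [hy]
        · rw [modify_map_index _ _ _ _ hnd hk]
          apply List.map_congr_left
          intro w hw
          rw [jC1_append]
          by_cases hwv : w = p.1
          · simp [hwv, hy]
          · simp [hwv, Ne.symm hwv, hy]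
    · -- fresh key: appended to all three lists
      have hidx : PySem.List.index? (jKeys qs) p.1 = none :=
        (PySem.List.index?_eq_none_iff _ _).mpr hmem
      have hkeys' : jKeys (qs ++ [p]) = jKeys qs ++ [p.1] := by
        rw [hkeys, PySem.Set.add_of_not_mem hmem]
      have hold0 : ∀ w ∈ jKeys qs, jC0 (qs ++ [p]) w = jC0 qs w := by
        intro w hw
        rw [jC0_append]
        have : ¬ (p.1 = w) := fun h => hmem (h ▸ hw)
        simp [this]
      have hold1 : ∀ w ∈ jKeys qs, jC1 (qs ++ [p]) w = jC1 qs w := by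
        intro w hw
        rw [jC1_append]
        have : ¬ (p.1 = w) := fun h => hmem (h ▸ hw)
        simp [this]
      by_cases hy : p.2 = 0
      · simp only [List.foldl_cons, List.foldl_nil, jointStep, hy, beq_self_eq_true, if_true, hidx]
        rw [hkeys']
        refine Prod.ext ?_ (Prod.ext ?_ rfl)
        · simp only [List.map_append, List.map_cons, List.map_nil]
          congr 1
          · exact (List.map_congr_left hold0).symm
          · simp [jC0_append, jC0_fresh qs p.1 hmem, hy]
        · simp only [List.map_append, List.map_cons, List.map_nil]
          congr 1
          · exact (List.map_congr_left hold1).symm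
          · simp [jC1_append, jC1_fresh qs p.1 hmem, hy]
      · simp only [List.foldl_cons, List.foldl_nil, jointStep, if_neg (by simp [hy] : ¬ (p.2 == 0) = true), hidx]
        rw [hkeys']
        refine Prod.ext ?_ (Prod.ext ?_ rfl)
        · simp only [List.map_append, List.map_cons, List.map_nil]
          congr 1
          · exact (List.map_congr_left hold0).symm
          · simp [jC0_append, jC0_fresh qs p.1 hmem, hy]
        · simp only [List.map_append, List.map_cons, List.map_nil]
          congr 1
          · exact (List.map_congr_left hold1).symm
          · simp [jC1_append, jC1_fresh qs p.1 hmem, hy]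

-- B's per-key count over the filtered-and-projected list equals the canonical count.
theorem count_filter_map_eq_jC0 (ps : List (Int × Int)) (v : Int) :
    (PySem.List.count ((ps.filter (fun p => p.2 == 0)).map Prod.fst) v : Int) = jC0 ps v := by
  rw [PySem.List.count_eq, List.count_eq_countP, List.countP_map, List.countP_filter, jC0]
  norm_cast

theorem zip_self_map {A B : Type} (K : List A) (f : A → B) :
    K.zip (K.map f) = K.map (fun k => (k, f k)) := by
  induction K with
  | nil => rfl
  | cons a K ih => simp [ih]

theorem countP_key_split (ps : List (Int × Int)) (v : Int) :
    ps.countP (fun p => p.1 == v) =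
      ps.countP (fun p => p.1 == v && p.2 == 0) + ps.countP (fun p => p.1 == v && !(p.2 == 0)) := by
  induction ps with
  | nil => simp
  | cons a l ih =>
    simp only [List.countP_cons]
    by_cases h1 : a.1 = v <;> by_cases h2 : a.2 = 0 <;> simp [h1, h2, ih] <;> omega

theorem count_map_sub_eq_jC1 (ps : List (Int × Int)) (v : Int) :
    (PySem.List.count (ps.map Prod.fst) v : Int) - jC0 ps v = jC1 ps v := by
  rw [PySem.List.count_eq, List.count_eq_countP, List.countP_map, jC0, jC1]
  have hcmp : ps.countP ((· == v) ∘ Prod.fst) = ps.countP (fun p => p.1 == v) :=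
    List.countP_congr (fun p _ => Iff.rfl)
  rw [hcmp, countP_key_split]
  push_cast
  ring

-- ===== VERDICT =====
theorem joint_spec : Claim_equal_joint := by
  intro x y _
  unfold Spec_joint joint joint_alt
  rw [jointA_loop (x.zip y)]
  have hc0 : (jKeys (x.zip y)).map (jC0 (x.zip y)) =
      (PySem.Set.ofList ((x.zip y).map Prod.fst)).map
        (fun k => (PySem.List.count (((x.zip y).filter (fun p => p.2 == 0)).map Prod.fst) k : Int)) := by
    apply List.map_congr_left
    intro v _
    exact (count_filter_map_eq_jC0 (x.zip y) v).symm
  refine Prod.ext (by simpa [jKeys] using hc0) ?_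
  simp only [jKeys] at hc0 ⊢
  rw [← hc0]
  rw [zip_self_map, List.map_map]
  apply List.map_congr_left
  intro v _
  exact (count_map_sub_eq_jC1 (x.zip y) v).symm
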